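-- pv_equiv track=rewrite | github.com/mateipiratul/llm_casestudy | plot_generators/study_plots.py | mode_binary
-- ===== SOURCE A (Python) =====
-- from typing import Dict, List, Tuple, Optional
--
-- def mode_binary(values: List[Optional[bool]]) -> Optional[bool]:
--     vals = [v for v in values if v is not None]
--     if not vals:
--         return None
--     y = sum(1 for v in vals if v)
--     n = len(vals) - y
--     if y > n:
--         return True
--     if n > y:
--         return False
--     return None
-- ===== SOURCE B (Python) =====
-- from typing import List, Optional
--
-- def mode_binary(values: List[Optional[bool]]) -> Optional[bool]:
--     # Median-of-sorted algorithm: sort the non-None booleans (False before True);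
--     # the strict majority value, if any, is the middle element; an even-length
--     # list whose two middle elements disagree is an exact tie.
--     vals = sorted(v for v in values if v is not None)
--     if not vals:
--         return None
--     k = len(vals)
--     mid = k // 2
--     if k % 2 == 0 and vals[mid - 1] != vals[mid]:
--         return None
--     return vals[mid]
-- ===== Notes on version B (the rewrite author's own statement) =====
-- stated objective: alternative
-- what changed: Replaces counting trues vs falses with a median-of-sorted algorithm: sort the non-None values and read the majority off the middle element(s), with a disagreeing middle pair signalling a tie.
import Mathlib
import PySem

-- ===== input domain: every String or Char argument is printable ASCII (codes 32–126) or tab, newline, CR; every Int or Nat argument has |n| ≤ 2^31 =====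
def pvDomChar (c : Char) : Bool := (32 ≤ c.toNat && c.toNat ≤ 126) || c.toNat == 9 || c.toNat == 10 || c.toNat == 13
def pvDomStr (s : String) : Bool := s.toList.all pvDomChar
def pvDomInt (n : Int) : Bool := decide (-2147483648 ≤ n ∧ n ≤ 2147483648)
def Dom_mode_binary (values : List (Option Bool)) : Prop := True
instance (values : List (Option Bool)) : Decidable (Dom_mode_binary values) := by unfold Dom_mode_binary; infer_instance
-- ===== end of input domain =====

-- B replaces counting with a median-of-sorted algorithm (sort non-None values, read the middle); objective: alternative.

-- ===== PORT A =====
def mode_binary (values : List (Option Bool)) : Option Bool :=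
  let vals := values.filterMap id
  if vals = [] then none
  else
    let y : Int := (vals.filter (fun v => v)).length
    let n : Int := (vals.length : Int) - y
    if y > n then some true
    else if n > y then some false
    else none

-- ===== PORT B =====
def mode_binary_alt (values : List (Option Bool)) : Option Bool :=
  let vals := PySem.List.sorted (values.filterMap id) (fun b => b) false
  if vals = [] then none
  else
    let k := vals.length
    let mid := k / 2
    -- indices mid (and mid - 1 when k is even, so k ≥ 2) are in range, so getD is exact Python indexing here
    if k % 2 = 0 ∧ vals.getD (mid - 1) false ≠ vals.getD mid false then none
    else some (vals.getD mid false)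

-- ===== PRECONDITION & SPEC =====
def Spec_mode_binary (values : List (Option Bool)) (out : Option Bool) : Prop := out = mode_binary_alt values
instance (values : List (Option Bool)) (out : Option Bool) : Decidable (Spec_mode_binary values out) := by unfold Spec_mode_binary; infer_instance

-- ===== CLAIM (what is proved, stated in full; the proofs are below) =====
def Claim_equal_mode_binary : Prop := ∀ (values : List (Option Bool)), Dom_mode_binary values → Spec_mode_binary values (mode_binary values)

-- ===== LEMMAS AND PROOFS =====

-- any Bool list is a permutation of (its falses, then its trues)
lemma perm_rep (l : List Bool) :
    (List.replicate (l.count false) false ++ List.replicate (l.count true) true).Perm l := by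
  induction l with
  | nil => simp
  | cons b t ih =>
    cases b
    · simpa [List.count_cons, List.replicate_succ] using ih.cons false
    · simpa [List.count_cons, List.replicate_succ] using (List.perm_middle).trans (ih.cons true)

-- sorted of a Bool list is its falses followed by its trues
lemma sorted_bool (l : List Bool) :
    PySem.List.sorted l (fun b => b) false
      = List.replicate (l.count false) false ++ List.replicate (l.count true) true := by
  refine PySem.List.sorted_id_eq_of_perm_of_pairwise l _ (perm_rep l) ?_
  rw [List.pairwise_append]
  refine ⟨List.pairwise_replicate.2 (Or.inr (le_refl _)),
          List.pairwise_replicate.2 (Or.inr (le_refl _)), ?_⟩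
  intro a ha b hb
  rw [List.eq_of_mem_replicate ha, List.eq_of_mem_replicate hb]
  exact Bool.false_le true

-- indexing into falses-then-trues
lemma getD_rep (n y i : ℕ) (h : i < n + y) :
    (List.replicate n false ++ List.replicate y true).getD i false = decide (n ≤ i) := by
  rcases Nat.lt_or_ge i n with h1 | h1
  · rw [List.getD_eq_getElem?_getD, List.getElem?_append_left (by simpa using h1)]
    simp [h1, Nat.not_le.2 h1]
  · rw [List.getD_eq_getElem?_getD, List.getElem?_append_right (by simpa using h1)]
    have : i - n < y := by omega
    simp [this, h1]

lemma count_filter_true (l : List Bool) : (l.filter (fun v => v)).length = l.count true := by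
  induction l with
  | nil => simp
  | cons b t ih => cases b <;> simp [ih]

lemma count_add (l : List Bool) : l.count false + l.count true = l.length := by
  induction l with
  | nil => simp
  | cons b t ih => cases b <;> simp <;> omega

-- ===== VERDICT (by name: the statement is the Claim_ definition above) =====
theorem mode_binary_spec : Claim_equal_mode_binary := by
  intro values _
  unfold Spec_mode_binary mode_binary mode_binary_alt
  simp only [sorted_bool, count_filter_true]
  generalize values.filterMap id = L
  have hlen : L.count false + L.count true = L.length := count_add L
  by_cases he : L = []
  · simp [he]
  · have hlen0 : 0 < L.length := List.length_pos_iff.2 he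
    set cF := L.count false with hcF
    set cT := L.count true with hcT
    have hne : ¬ (List.replicate cF false ++ List.replicate cT true = ([] : List Bool)) := by
      simp; omega
    rw [if_neg he, if_neg hne]
    simp only [List.length_append, List.length_replicate]
    have hmid : (cF + cT) / 2 < cF + cT := by omega
    rw [getD_rep _ _ _ hmid]
    rcases Nat.lt_trichotomy cF cT with hlt | heq | hgt
    · have h1 : ((cT : Int) > (L.length : Int) - cT) := by omega
      rw [if_pos h1, decide_eq_true (show cF ≤ (cF + cT) / 2 by omega)]
      rw [if_neg]
      rintro ⟨hev, hneq⟩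
      rw [getD_rep _ _ _ (by omega)] at hneq
      have ha : cF ≤ (cF + cT) / 2 - 1 := by omega
      have hb : cF ≤ (cF + cT) / 2 := by omega
      simp [ha] at hneq
    · have h1 : ¬ ((cT : Int) > (L.length : Int) - cT) := by omega
      have h2 : ¬ ((L.length : Int) - cT > cT) := by omega
      rw [if_neg h1, if_neg h2, if_pos]
      refine ⟨by omega, ?_⟩
      rw [getD_rep _ _ _ (by omega)]
      have ha : cF ≤ (cF + cT) / 2 := by omega
      have hb : ¬ cF ≤ (cF + cT) / 2 - 1 := by omega
      simp [ha, hb]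
    · have h1 : ¬ ((cT : Int) > (L.length : Int) - cT) := by omega
      have h2 : ((L.length : Int) - cT > cT) := by omega
      have hm : ¬ cF ≤ (cF + cT) / 2 := by omega
      rw [if_neg h1, if_pos h2, if_neg]
      · simp [hm]
      rintro ⟨hev, hneq⟩
      rw [getD_rep _ _ _ (by omega)] at hneq
      have hb : ¬ cF ≤ (cF + cT) / 2 - 1 := by omega
      simp [hb, hm] at hneq
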